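-- pv_equiv track=rewrite | github.com/reubenfirmin/bubblewrap-tui | tests/test_dns_proxy.py | should_block_impl
-- ===== SOURCE A (Python) =====
-- def should_block_impl(hostname: str, mode: str, hosts: list[str]) -> bool:
--     """Reference implementation of should_block for testing."""
--     hostname = hostname.lower().rstrip(".")
--
--     for pattern in hosts:
--         pattern = pattern.lower().rstrip(".")
--
--         # Wildcard pattern: *.example.com
--         if pattern.startswith("*."):
--             suffix = pattern[1:]  # ".example.com"
--             if hostname.endswith(suffix) and hostname != suffix[1:]:
--                 return mode == "blacklist"
--             continue
--
--         # Exact match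
--         if hostname == pattern:
--             return mode == "blacklist"
--
--         # Subdomain match
--         if hostname.endswith("." + pattern):
--             return mode == "blacklist"
--
--     return mode == "whitelist"
-- ===== SOURCE B (Python) =====
-- def should_block_impl(hostname: str, mode: str, hosts: list[str]) -> bool:
--     """Index the patterns into two sets once, then test the hostname's own
--     label suffixes against them instead of scanning pattern by pattern."""
--     h = hostname.lower().rstrip(".")
--     exact = set()    # plain patterns: match the hostname itself
--     suffix = set()   # bases X such that any strict subdomain ".X" matches
--     for raw in hosts:
--         p = raw.lower().rstrip(".")
--         if p.startswith("*."):
--             suffix.add(p[2:])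
--         else:
--             exact.add(p)
--             suffix.add(p)
--     tails = [h[i + 1:] for i in range(len(h)) if h[i] == "."]
--     matched = h in exact or any(t in suffix for t in tails)
--     return mode == "blacklist" if matched else mode == "whitelist"
-- ===== Notes on version B (the rewrite author's own statement) =====
-- stated objective: alternative
-- what changed: B builds exact/suffix pattern sets in one pass and then matches by enumerating the hostname's own parent suffixes with set lookups, instead of A's per-pattern endswith scan with early return.
import Mathlib
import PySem

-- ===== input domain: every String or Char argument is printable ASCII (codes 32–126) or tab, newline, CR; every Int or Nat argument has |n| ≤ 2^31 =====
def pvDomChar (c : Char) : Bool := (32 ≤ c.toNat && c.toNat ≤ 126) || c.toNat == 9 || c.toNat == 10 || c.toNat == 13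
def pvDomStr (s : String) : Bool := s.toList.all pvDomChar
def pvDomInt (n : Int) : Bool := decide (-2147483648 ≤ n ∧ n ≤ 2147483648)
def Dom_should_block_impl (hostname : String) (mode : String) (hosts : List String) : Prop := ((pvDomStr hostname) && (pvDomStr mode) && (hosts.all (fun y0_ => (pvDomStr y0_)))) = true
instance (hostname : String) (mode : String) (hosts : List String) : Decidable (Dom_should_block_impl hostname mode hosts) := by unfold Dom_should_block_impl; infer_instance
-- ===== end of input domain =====

-- B replaces A's per-pattern endswith scan by indexing the patterns into two sets once and
-- looking up the hostname and its parent suffixes (objective: alternative algorithm, same cost).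

-- ===== PORT A =====
-- s.rstrip(".") — ported by hand (PySem has no one-sided strip-with-chars): drop trailing '.'
-- characters; exact, since the strip set is the single character '.'.
def pvRstripDot (s : List Char) : List Char := (s.reverse.dropWhile (· == '.')).reverse

-- hostname.lower().rstrip(".") — the normalization both Pythons perform
def pvNorm (s : String) : List Char := pvRstripDot (PySem.Chars.lower s.toList)

def should_block_impl_go (h : List Char) (mode : String) : List String → Bool
  | [] => mode == "whitelist"
  | pat :: rest =>
    let p := pvNorm pat
    if PySem.Chars.startswith p ['*', '.'] then
      let suffix := PySem.List.slice p (some 1) none          -- pattern[1:]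
      if PySem.Chars.endswith h suffix &&
         !(h == PySem.List.slice suffix (some 1) none) then   -- hostname != suffix[1:]
        mode == "blacklist"
      else should_block_impl_go h mode rest                   -- continue
    else if h == p then mode == "blacklist"                   -- exact match
    else if PySem.Chars.endswith h ('.' :: p) then            -- "." + pattern
      mode == "blacklist"
    else should_block_impl_go h mode rest

def should_block_impl (hostname : String) (mode : String) (hosts : List String) : Bool :=
  should_block_impl_go (pvNorm hostname) mode hosts

-- ===== PORT B =====
-- the one pass over hosts building (exact, suffix) as in Source B
def pvSetsB (hosts : List String) : PySem.Set (List Char) × PySem.Set (List Char) :=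
  hosts.foldl
    (fun st raw =>
      let p := pvNorm raw
      if PySem.Chars.startswith p ['*', '.'] then
        (st.1, st.2.add (PySem.List.slice p (some 2) none))   -- p[2:]
      else
        (st.1.add p, st.2.add p))
    (PySem.Set.ofList [], PySem.Set.ofList [])

-- [h[i+1:] for i in range(len(h)) if h[i] == "."]
def pvTails (h : List Char) : List (List Char) :=
  (List.range h.length).filterMap
    (fun (i : Nat) => if PySem.List.pyGet? h (i : Int) == some '.'
              then some (PySem.List.slice h (some ((i : Int) + 1)) none) else none)

def should_block_impl_alt (hostname : String) (mode : String) (hosts : List String) : Bool :=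
  let h := pvNorm hostname
  let st := pvSetsB hosts
  let matched := st.1.contains h || (pvTails h).any (fun t => st.2.contains t)
  if matched then mode == "blacklist" else mode == "whitelist"

-- ===== PRECONDITION & SPEC =====
def Spec_should_block_impl (hostname : String) (mode : String) (hosts : List String) (out : Bool) : Prop := out = should_block_impl_alt hostname mode hosts
instance (hostname : String) (mode : String) (hosts : List String) (out : Bool) : Decidable (Spec_should_block_impl hostname mode hosts out) := by unfold Spec_should_block_impl; infer_instance

-- ===== CLAIM (what is proved, stated in full; the proofs are below) =====
def Claim_equal_should_block_impl : Prop := ∀ (hostname : String) (mode : String) (hosts : List String), Dom_should_block_impl hostname mode hosts → Spec_should_block_impl hostname mode hosts (should_block_impl hostname mode hosts)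

-- ===== LEMMAS AND PROOFS =====

theorem pvSlice1 (xs : List Char) : PySem.List.slice xs (some 1) none = xs.drop 1 := by
  simp [PySem.List.slice_from]

theorem pvSlice2 (xs : List Char) : PySem.List.slice xs (some 2) none = xs.drop 2 := by
  simp [PySem.List.slice_from]

theorem pvSliceSucc (xs : List Char) (i : Nat) :
    PySem.List.slice xs (some ((i : Int) + 1)) none = xs.drop (i + 1) := by
  have h0 : (0 : Int) ≤ (i : Int) + 1 := by positivity
  have := PySem.List.slice_from xs h0
  simpa [Int.toNat_add] using this

theorem pvContains_iff (s : PySem.Set (List Char)) (x : List Char) :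
    s.contains x = true ↔ x ∈ s := List.contains_iff_mem

-- whether one (already normalized) pattern p matches hostname h, exactly as A tests it
def pvMatch (h p : List Char) : Bool :=
  if PySem.Chars.startswith p ['*', '.'] then
    PySem.Chars.endswith h (p.drop 1) && !(h == (p.drop 1).drop 1)
  else h == p || PySem.Chars.endswith h ('.' :: p)

theorem pvGo_step (h : List Char) (mode : String) (pat : String) (rest : List String) :
    should_block_impl_go h mode (pat :: rest) =
      if pvMatch h (pvNorm pat) then (mode == "blacklist")
      else should_block_impl_go h mode rest := by
  simp only [should_block_impl_go, pvSlice1, pvMatch]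
  by_cases hw : PySem.Chars.startswith (pvNorm pat) ['*', '.'] = true
  · by_cases hm : (PySem.Chars.endswith h (List.drop 1 (pvNorm pat)) &&
        !(h == List.drop 1 (List.drop 1 (pvNorm pat)))) = true
    · simp only [hw, hm]; simp
    · rw [Bool.not_eq_true] at hm
      simp only [hw, hm]; simp
  · rw [Bool.not_eq_true] at hw
    by_cases he : (h == pvNorm pat) = true
    · simp only [hw, he]; simp
    · rw [Bool.not_eq_true] at he
      by_cases hs : PySem.Chars.endswith h ('.' :: pvNorm pat) = true
      · simp only [hw, he, hs]; simp
      · rw [Bool.not_eq_true] at hs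
        simp only [hw, he, hs]; simp

theorem pvGo_eq_any (h : List Char) (mode : String) (hosts : List String) :
    should_block_impl_go h mode hosts =
      if hosts.any (fun pat => pvMatch h (pvNorm pat)) then (mode == "blacklist")
      else (mode == "whitelist") := by
  induction hosts with
  | nil => rfl
  | cons pat rest ih =>
    rw [pvGo_step, ih, List.any_cons]
    cases hp : pvMatch h (pvNorm pat) <;> simp

-- B's tail list contains exactly the q with '.' ++ q a suffix of h
theorem pvMem_tails (h q : List Char) : q ∈ pvTails h ↔ ('.' :: q) <:+ h := by
  simp only [pvTails, List.mem_filterMap, List.mem_range, PySem.List.pyGet?_natCast, pvSliceSucc]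
  constructor
  · rintro ⟨i, hi, hcond⟩
    by_cases hget : h[i]? = some '.'
    · rw [if_pos (by simp [hget])] at hcond
      simp only [Option.some.injEq] at hcond
      have hlt : i < h.length := hi
      have hdot : h[i] = '.' := by
        have := List.getElem?_eq_getElem hlt
        rw [hget] at this; exact (Option.some.injEq _ _).mp this.symm
      refine ⟨h.take i, ?_⟩
      have hd := List.drop_eq_getElem_cons hlt
      rw [hdot, hcond] at hd
      calc h.take i ++ '.' :: q = h.take i ++ h.drop i := by rw [hd]
        _ = h := List.take_append_drop i h
    · rw [if_neg (by simpa using hget)] at hcond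
      cases hcond
  · rintro ⟨s, hs⟩
    have hlen := congrArg List.length hs
    simp at hlen
    have hlt : s.length < h.length := by omega
    have hdrop : h.drop s.length = '.' :: q := by rw [← hs, List.drop_left]
    have hcons : h[s.length] :: h.drop (s.length + 1) = '.' :: q := by
      rw [← List.drop_eq_getElem_cons hlt, hdrop]
    have h1 : h[s.length] = '.' := by injection hcons
    have h2 : h.drop (s.length + 1) = q := by injection hcons
    have hget : h[s.length]? = some '.' := by
      rw [List.getElem?_eq_getElem hlt, h1]
    exact ⟨s.length, by simpa using hlt, by rw [if_pos (by simp [hget])]; simp [h2]⟩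

-- membership in the two sets built by B's single pass
theorem pvMem_setsB (hosts : List String) (x : List Char) :
    (x ∈ (pvSetsB hosts).1 ↔
       ∃ pat ∈ hosts, PySem.Chars.startswith (pvNorm pat) ['*', '.'] = false ∧ pvNorm pat = x) ∧
    (x ∈ (pvSetsB hosts).2 ↔
       ∃ pat ∈ hosts,
         (if PySem.Chars.startswith (pvNorm pat) ['*', '.'] then (pvNorm pat).drop 2 else pvNorm pat) = x) := by
  suffices H : ∀ (st : PySem.Set (List Char) × PySem.Set (List Char)),
      (x ∈ (hosts.foldl
        (fun st raw =>
          let p := pvNorm raw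
          if PySem.Chars.startswith p ['*', '.'] then
            (st.1, st.2.add (PySem.List.slice p (some 2) none))
          else (st.1.add p, st.2.add p)) st).1 ↔
        x ∈ st.1 ∨ ∃ pat ∈ hosts, PySem.Chars.startswith (pvNorm pat) ['*', '.'] = false ∧ pvNorm pat = x) ∧
      (x ∈ (hosts.foldl
        (fun st raw =>
          let p := pvNorm raw
          if PySem.Chars.startswith p ['*', '.'] then
            (st.1, st.2.add (PySem.List.slice p (some 2) none))
          else (st.1.add p, st.2.add p)) st).2 ↔
        x ∈ st.2 ∨ ∃ pat ∈ hosts,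
          (if PySem.Chars.startswith (pvNorm pat) ['*', '.'] then (pvNorm pat).drop 2 else pvNorm pat) = x) by
    have := H (PySem.Set.ofList [], PySem.Set.ofList [])
    simpa [pvSetsB, PySem.Set.mem_ofList] using this
  induction hosts with
  | nil => intro st; simp
  | cons pat rest ih =>
    intro st
    simp only [List.foldl_cons, List.mem_cons]
    by_cases hw : PySem.Chars.startswith (pvNorm pat) ['*', '.'] = true
    · constructor
      · rw [(ih _).1]
        simp only [hw, if_pos]
        constructor
        · rintro (hx | ⟨p, hp, hnp, he⟩)
          · exact Or.inl hx
          · exact Or.inr ⟨p, Or.inr hp, hnp, he⟩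
        · rintro (hx | ⟨p, (rfl | hp), hnp, he⟩)
          · exact Or.inl hx
          · rw [hw] at hnp; cases hnp
          · exact Or.inr ⟨p, hp, hnp, he⟩
      · rw [(ih _).2]
        simp only [hw, if_pos, PySem.Set.mem_add, pvSlice2]
        constructor
        · rintro (⟨hx | hx⟩ | ⟨p, hp, he⟩)
          · exact Or.inl hx
          · exact Or.inr ⟨pat, Or.inl rfl, by simp [hw, hx]⟩
          · exact Or.inr ⟨p, Or.inr hp, he⟩
        · rintro (hx | ⟨p, (rfl | hp), he⟩)
          · exact Or.inl (Or.inl hx)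
          · simp only [hw, if_pos] at he
            exact Or.inl (Or.inr he.symm)
          · exact Or.inr ⟨p, hp, he⟩
    · simp only [Bool.not_eq_true] at hw
      constructor
      · rw [(ih _).1]
        simp only [hw, Bool.false_eq_true, if_false, PySem.Set.mem_add]
        constructor
        · rintro (⟨hx | hx⟩ | ⟨p, hp, hnp, he⟩)
          · exact Or.inl hx
          · exact Or.inr ⟨pat, Or.inl rfl, hw, hx.symm⟩
          · exact Or.inr ⟨p, Or.inr hp, hnp, he⟩
        · rintro (hx | ⟨p, (rfl | hp), hnp, he⟩)
          · exact Or.inl (Or.inl hx)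
          · exact Or.inl (Or.inr he.symm)
          · exact Or.inr ⟨p, hp, hnp, he⟩
      · rw [(ih _).2]
        simp only [hw, Bool.false_eq_true, if_false, PySem.Set.mem_add]
        constructor
        · rintro (⟨hx | hx⟩ | ⟨p, hp, he⟩)
          · exact Or.inl hx
          · exact Or.inr ⟨pat, Or.inl rfl, by simp [hw, hx]⟩
          · exact Or.inr ⟨p, Or.inr hp, he⟩
        · rintro (hx | ⟨p, (rfl | hp), he⟩)
          · exact Or.inl (Or.inl hx)
          · simp only [hw, Bool.false_eq_true, if_false] at he
            exact Or.inl (Or.inr he.symm)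
          · exact Or.inr ⟨p, hp, he⟩

-- a pattern matches iff B's set/tails test sees it
theorem pvMatch_iff (h p : List Char) :
    pvMatch h p = true ↔
      (if PySem.Chars.startswith p ['*', '.'] then (p.drop 2) ∈ pvTails h
       else (p = h ∨ p ∈ pvTails h)) := by
  unfold pvMatch
  by_cases hw : PySem.Chars.startswith p ['*', '.'] = true
  · simp only [hw, if_pos, Bool.and_eq_true, Bool.not_eq_true', beq_eq_false_iff_ne]
    obtain ⟨q, rfl⟩ : ∃ q, p = '*' :: '.' :: q := by
      rw [PySem.Chars.startswith_iff] at hw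
      obtain ⟨t, ht⟩ := hw
      exact ⟨t, ht.symm⟩
    simp only [List.drop_succ_cons, List.drop_zero]
    rw [pvMem_tails, PySem.Chars.endswith_iff]
    constructor
    · exact fun a => a.1
    · intro hs
      refine ⟨hs, ?_⟩
      intro rfl'
      obtain ⟨s, hsq⟩ := hs
      have := congrArg List.length hsq
      simp [rfl'] at this
      omega
  · simp only [Bool.not_eq_true] at hw
    simp only [hw, Bool.false_eq_true, if_false, Bool.or_eq_true, beq_iff_eq]
    rw [pvMem_tails, PySem.Chars.endswith_iff]
    tauto

theorem pvA_eq_B (hostname mode : String) (hosts : List String) :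
    should_block_impl hostname mode hosts = should_block_impl_alt hostname mode hosts := by
  unfold should_block_impl should_block_impl_alt
  rw [pvGo_eq_any]
  have hiff :
      (hosts.any (fun pat => pvMatch (pvNorm hostname) (pvNorm pat)) = true) ↔
      (((pvSetsB hosts).1.contains (pvNorm hostname) ||
        (pvTails (pvNorm hostname)).any (fun t => (pvSetsB hosts).2.contains t)) = true) := by
    simp only [List.any_eq_true, Bool.or_eq_true, pvContains_iff]
    constructor
    · rintro ⟨pat, hp, hm⟩
      rw [pvMatch_iff] at hm
      by_cases hw : PySem.Chars.startswith (pvNorm pat) ['*', '.'] = true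
      · rw [if_pos hw] at hm
        exact Or.inr ⟨_, hm, ((pvMem_setsB hosts _).2).mpr ⟨pat, hp, by rw [if_pos hw]⟩⟩
      · simp only [Bool.not_eq_true] at hw
        rw [hw] at hm
        simp only [Bool.false_eq_true, if_false] at hm
        rcases hm with hm | hm
        · exact Or.inl (((pvMem_setsB hosts _).1).mpr ⟨pat, hp, hw, hm⟩)
        · exact Or.inr ⟨_, hm, ((pvMem_setsB hosts _).2).mpr ⟨pat, hp, by rw [hw]; simp⟩⟩
    · rintro (hx | ⟨t, ht, hs⟩)
      · obtain ⟨pat, hp, hnw, he⟩ := ((pvMem_setsB hosts _).1).mp hx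
        exact ⟨pat, hp, by rw [pvMatch_iff, hnw]; simp [he]⟩
      · obtain ⟨pat, hp, he⟩ := ((pvMem_setsB hosts _).2).mp hs
        refine ⟨pat, hp, ?_⟩
        rw [pvMatch_iff]
        split at he <;> rename_i hw
        · rw [if_pos hw, he]; exact ht
        · simp only [Bool.not_eq_true] at hw
          rw [hw]; simp only [Bool.false_eq_true, if_false]
          exact Or.inr (he ▸ ht)
  by_cases hm : hosts.any (fun pat => pvMatch (pvNorm hostname) (pvNorm pat)) = true
  · rw [if_pos hm, if_pos (hiff.mp hm)]
  · rw [if_neg hm, if_neg (fun hc => hm (hiff.mpr hc))]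

-- ===== VERDICT (by name: the statement is the Claim_ definition above) =====
theorem should_block_impl_spec : Claim_equal_should_block_impl := by
  intro hostname mode hosts _
  unfold Spec_should_block_impl
  exact pvA_eq_B hostname mode hosts
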